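-- pv_equiv track=rewrite | github.com/LokoInsanus/ABC | functions.py | calcularClassificacao
-- ===== SOURCE A (Python) =====
-- def calcularClassificacao(corte: list, acumulada:list):
--   classificacao = []
--   for i in range(len(acumulada)):
--     if acumulada[i] <= corte[0]:
--       classificacao.append('A')
--     elif acumulada[i] <= corte[1]:
--       classificacao.append('B')
--     elif acumulada[i] <= corte[2]:
--       classificacao.append('C')
--     else:
--       classificacao.append('C')
--   return classificacao
-- ===== SOURCE B (Python) =====
-- def calcularClassificacao(corte, acumulada):
--   grades = ['C'] * len(acumulada)
--   pending = list(range(len(acumulada)))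
--   for letter, k in (('A', 0), ('B', 1)):
--     if not pending:
--       break
--     cutoff = corte[k]
--     rest = []
--     for i in pending:
--       if acumulada[i] <= cutoff:
--         grades[i] = letter
--       else:
--         rest.append(i)
--     pending = rest
--   return grades
-- ===== Notes on version B (the rewrite author's own statement) =====
-- stated objective: alternative
-- what changed: Replaced the per-element if/elif chain by a worklist refinement: B pre-fills all grades with 'C', then makes one pass per cutoff ('A' then 'B') over a shrinking list of still-ungraded indices, overwriting matches in place.
import Mathlib
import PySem

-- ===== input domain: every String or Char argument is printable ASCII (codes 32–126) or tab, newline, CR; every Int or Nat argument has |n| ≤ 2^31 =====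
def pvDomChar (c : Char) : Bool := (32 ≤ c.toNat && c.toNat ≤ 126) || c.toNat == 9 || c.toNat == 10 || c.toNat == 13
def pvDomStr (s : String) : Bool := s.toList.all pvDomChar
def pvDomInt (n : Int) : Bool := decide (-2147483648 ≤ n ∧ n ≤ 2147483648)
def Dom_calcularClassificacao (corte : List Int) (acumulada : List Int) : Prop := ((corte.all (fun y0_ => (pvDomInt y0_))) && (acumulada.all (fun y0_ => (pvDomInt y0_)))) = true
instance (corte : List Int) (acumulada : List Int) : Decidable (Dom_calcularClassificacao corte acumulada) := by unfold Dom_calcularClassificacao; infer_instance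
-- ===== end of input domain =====

-- B replaces A's per-element if/elif chain by a worklist refinement: all grades start
-- as 'C' and one pass per cutoff over the shrinking list of ungraded indices overwrites
-- matches (objective: alternative, no speed claim).

-- ===== PORT A =====
def calcularClassificacao (corte : List Int) (acumulada : List Int) : List String :=
  (PySem.List.pyRange 0 acumulada.length 1).foldl
    (fun cls i =>
      if PySem.List.pyGetD acumulada i 0 ≤ PySem.List.pyGetD corte 0 0 then cls ++ ["A"]
      else if PySem.List.pyGetD acumulada i 0 ≤ PySem.List.pyGetD corte 1 0 then cls ++ ["B"]
      else if PySem.List.pyGetD acumulada i 0 ≤ PySem.List.pyGetD corte 2 0 then cls ++ ["C"]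
      else cls ++ ["C"]) []

-- ===== PORT B =====
-- inner loop body: 'if acumulada[i] <= cutoff: grades[i] = letter  else: rest.append(i)'
def pvPassStep (acumulada : List Int) (cutoff : Int) (letter : String)
    (st : List String × List Int) (i : Int) : List String × List Int :=
  if PySem.List.pyGetD acumulada i 0 ≤ cutoff then (PySem.List.pySetD st.1 i letter, st.2)
  else (st.1, st.2 ++ [i])

-- 'break' when pending is empty: with exactly two (letter, k) pairs, leaving the state
-- unchanged on this and (necessarily) the remaining iteration is the same as breaking.
def calcularClassificacao_alt (corte : List Int) (acumulada : List Int) : List String :=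
  ([("A", (0 : Int)), ("B", 1)].foldl
      (fun st lk =>
        if st.2 = [] then st
        else st.2.foldl (pvPassStep acumulada (PySem.List.pyGetD corte lk.2 0) lk.1) (st.1, []))
      (List.replicate acumulada.length "C", PySem.List.pyRange 0 acumulada.length 1)).1

-- ===== PRECONDITION & SPEC =====
-- Pre_ excludes exactly the inputs on which A raises IndexError: corte[0] is read for any
-- value, corte[1] once some value exceeds corte[0], corte[2] once some value exceeds both.
def Pre_calcularClassificacao (corte : List Int) (acumulada : List Int) : Prop :=
  acumulada = [] ∨
    (1 ≤ corte.length ∧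
      ((∃ v ∈ acumulada, PySem.List.pyGetD corte 0 0 < v) →
        (2 ≤ corte.length ∧
          ((∃ v ∈ acumulada, PySem.List.pyGetD corte 0 0 < v ∧ PySem.List.pyGetD corte 1 0 < v) →
            3 ≤ corte.length))))
instance (corte : List Int) (acumulada : List Int) : Decidable (Pre_calcularClassificacao corte acumulada) := by unfold Pre_calcularClassificacao; infer_instance

def pvWitness_calcularClassificacao : List Int × List Int := ([3, 6, 9], [2, 5, 11])

def Spec_calcularClassificacao (corte : List Int) (acumulada : List Int) (out : List String) : Prop := out = calcularClassificacao_alt corte acumulada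
instance (corte : List Int) (acumulada : List Int) (out : List String) : Decidable (Spec_calcularClassificacao corte acumulada out) := by unfold Spec_calcularClassificacao; infer_instance

-- ===== CLAIM (what is proved, stated in full; the proofs are below) =====
def Claim_equal_calcularClassificacao : Prop := ∀ (corte : List Int) (acumulada : List Int), Dom_calcularClassificacao corte acumulada → Pre_calcularClassificacao corte acumulada → Spec_calcularClassificacao corte acumulada (calcularClassificacao corte acumulada)

-- ===== LEMMAS AND PROOFS =====

-- the grade a value receives (used only in the proofs, to relate the two ports)
def pvGrade (c0 c1 v : Int) : String := if v ≤ c0 then "A" else if v ≤ c1 then "B" else "C"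

theorem pvA_eq_map (corte : List Int) (acumulada : List Int) :
    calcularClassificacao corte acumulada =
      acumulada.map
        (pvGrade (PySem.List.pyGetD corte 0 0) (PySem.List.pyGetD corte 1 0)) := by
  unfold calcularClassificacao
  rw [PySem.List.foldl_pyRange_zero_pyGetD' acumulada 0
    (fun cls v =>
      if v ≤ PySem.List.pyGetD corte 0 0 then cls ++ ["A"]
      else if v ≤ PySem.List.pyGetD corte 1 0 then cls ++ ["B"]
      else if v ≤ PySem.List.pyGetD corte 2 0 then cls ++ ["C"]
      else cls ++ ["C"]) []]
  have hf : (fun (cls : List String) v =>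
      if v ≤ PySem.List.pyGetD corte 0 0 then cls ++ ["A"]
      else if v ≤ PySem.List.pyGetD corte 1 0 then cls ++ ["B"]
      else if v ≤ PySem.List.pyGetD corte 2 0 then cls ++ ["C"]
      else cls ++ ["C"]) =
      fun cls v => cls ++ [pvGrade (PySem.List.pyGetD corte 0 0) (PySem.List.pyGetD corte 1 0) v] := by
    funext cls v; unfold pvGrade; split_ifs <;> rfl
  rw [hf, PySem.List.foldl_append_singleton_eq_map, List.nil_append]

theorem pvPass_snd (acumulada : List Int) (cutoff : Int) (letter : String) :
    ∀ (pending : List Int) (grades : List String) (rest : List Int),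
      (pending.foldl (pvPassStep acumulada cutoff letter) (grades, rest)).2 =
        rest ++ pending.filter (fun i => !decide (PySem.List.pyGetD acumulada i 0 ≤ cutoff)) := by
  intro pending
  induction pending with
  | nil => intro grades rest; simp
  | cons i ps ih =>
      intro grades rest
      by_cases h : PySem.List.pyGetD acumulada i 0 ≤ cutoff
      · simp [List.foldl_cons, pvPassStep, h, ih]
      · simp [List.foldl_cons, pvPassStep, h, ih]

theorem pvPass_fst_length (acumulada : List Int) (cutoff : Int) (letter : String) :
    ∀ (pending : List Int) (grades : List String) (rest : List Int),
      (pending.foldl (pvPassStep acumulada cutoff letter) (grades, rest)).1.length =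
        grades.length := by
  intro pending
  induction pending with
  | nil => intro grades rest; rfl
  | cons i ps ih =>
      intro grades rest
      by_cases h : PySem.List.pyGetD acumulada i 0 ≤ cutoff
      · simp [List.foldl_cons, pvPassStep, h, ih, PySem.List.length_pySetD]
      · simp [List.foldl_cons, pvPassStep, h, ih]

theorem pvPass_fst_get? (acumulada : List Int) (cutoff : Int) (letter : String) :
    ∀ (pending : List Int), (∀ i ∈ pending, 0 ≤ i) →
      ∀ (grades : List String) (rest : List Int) (j : Nat), j < grades.length →
      ((pending.foldl (pvPassStep acumulada cutoff letter) (grades, rest)).1)[j]? =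
        if ((j : Int) ∈ pending ∧ PySem.List.pyGetD acumulada (j : Int) 0 ≤ cutoff)
        then some letter else grades[j]? := by
  intro pending
  induction pending with
  | nil => intro _ grades rest j hj; simp
  | cons i ps ih =>
      intro hpos grades rest j hj
      have hi : 0 ≤ i := hpos i (List.mem_cons_self ..)
      have hps : ∀ x ∈ ps, 0 ≤ x := fun x hx => hpos x (List.mem_cons_of_mem _ hx)
      rw [List.foldl_cons]
      simp only [pvPassStep]
      by_cases h : PySem.List.pyGetD acumulada i 0 ≤ cutoff
      · rw [if_pos h, PySem.List.pySetD_of_nonneg grades letter hi]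
        rw [ih hps (grades.set i.toNat letter) rest j (by simpa using hj)]
        by_cases hij : (j : Int) = i
        · have hji : i.toNat = j := by omega
          have hle : PySem.List.pyGetD acumulada (j : Int) 0 ≤ cutoff := by rw [hij]; exact h
          have hRHS : ((j : Int) ∈ i :: ps ∧ PySem.List.pyGetD acumulada (j : Int) 0 ≤ cutoff) :=
            ⟨hij ▸ List.mem_cons_self .., hle⟩
          rw [if_pos hRHS, List.getElem?_set, if_pos hji, if_pos (by omega : i.toNat < grades.length)]
          split_ifs <;> rfl
        · have hji : ¬ i.toNat = j := by omega
          rw [List.getElem?_set, if_neg hji]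
          by_cases hmem : (j : Int) ∈ ps ∧ PySem.List.pyGetD acumulada (j : Int) 0 ≤ cutoff
          · rw [if_pos hmem, if_pos ⟨List.mem_cons_of_mem _ hmem.1, hmem.2⟩]
          · rw [if_neg hmem, if_neg]
            rintro ⟨hm, hle⟩
            rcases List.mem_cons.mp hm with h' | h'
            · exact hij h'
            · exact hmem ⟨h', hle⟩
      · rw [if_neg h]
        rw [ih hps grades (rest ++ [i]) j hj]
        by_cases hmem : (j : Int) ∈ ps ∧ PySem.List.pyGetD acumulada (j : Int) 0 ≤ cutoff
        · rw [if_pos hmem, if_pos ⟨List.mem_cons_of_mem _ hmem.1, hmem.2⟩]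
        · rw [if_neg hmem, if_neg]
          rintro ⟨hm, hle⟩
          rcases List.mem_cons.mp hm with h' | h'
          · exact h (h' ▸ hle)
          · exact hmem ⟨h', hle⟩

theorem pvB_eq_map (corte : List Int) (acumulada : List Int) :
    calcularClassificacao_alt corte acumulada =
      acumulada.map
        (pvGrade (PySem.List.pyGetD corte 0 0) (PySem.List.pyGetD corte 1 0)) := by
  set c0 := PySem.List.pyGetD corte 0 0 with hc0
  set c1 := PySem.List.pyGetD corte 1 0 with hc1
  set n := acumulada.length with hn
  set rng := PySem.List.pyRange 0 (n : Int) 1 with hrng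
  have hmem : ∀ j : Nat, j < n → ((j : Int) ∈ rng) := by
    intro j hjn
    rw [hrng, PySem.List.mem_pyRange_one]
    constructor <;> omega
  have hposrng : ∀ i ∈ rng, 0 ≤ i := by
    intro i hi
    rw [hrng, PySem.List.mem_pyRange_one] at hi
    exact hi.1
  unfold calcularClassificacao_alt
  simp only [List.foldl_cons, List.foldl_nil, ← hn, ← hrng]
  -- the empty-pending guard equals running the pass on the empty pending list
  have hguard1 : ∀ (letter : String) (cutoff : Int) (g : List String) (p : List Int),
      (if p = [] then (g, p)
       else p.foldl (pvPassStep acumulada cutoff letter) (g, [])) =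
      p.foldl (pvPassStep acumulada cutoff letter) (g, []) := by
    intro letter cutoff g p
    by_cases h : p = []
    · subst h; simp
    · rw [if_neg h]
  have hguard2 : ∀ (letter : String) (cutoff : Int) (st : List String × List Int),
      (if st.2 = [] then st
       else st.2.foldl (pvPassStep acumulada cutoff letter) (st.1, [])) =
      st.2.foldl (pvPassStep acumulada cutoff letter) (st.1, []) := by
    intro letter cutoff st
    by_cases h : st.2 = []
    · rcases st with ⟨g, p⟩
      simp only at h
      subst h
      simp
    · rw [if_neg h]
  rw [hguard1, hguard1]
  set st1 := rng.foldl (pvPassStep acumulada c0 "A") (List.replicate n "C", []) with hst1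
  have hst1len : st1.1.length = n := by
    rw [hst1, pvPass_fst_length]; simp
  have hst1get : ∀ j : Nat, j < n →
      st1.1[j]? = some (if PySem.List.pyGetD acumulada (j : Int) 0 ≤ c0 then "A" else "C") := by
    intro j hj
    rw [hst1, pvPass_fst_get? acumulada c0 "A" rng hposrng (List.replicate n "C") [] j (by simpa using hj)]
    by_cases h : PySem.List.pyGetD acumulada (j : Int) 0 ≤ c0
    · rw [if_pos ⟨hmem j hj, h⟩, if_pos h]
    · rw [if_neg (by rintro ⟨_, hle⟩; exact h hle), if_neg h, List.getElem?_replicate, if_pos hj]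
  have hst1snd : st1.2 = rng.filter (fun i => !decide (PySem.List.pyGetD acumulada i 0 ≤ c0)) := by
    rw [hst1, pvPass_snd]; simp
  have hmem1 : ∀ j : Nat, j < n →
      ((j : Int) ∈ st1.2 ↔ ¬ PySem.List.pyGetD acumulada (j : Int) 0 ≤ c0) := by
    intro j hj
    rw [hst1snd, List.mem_filter]
    simp [hmem j hj]
  have hpos1 : ∀ i ∈ st1.2, 0 ≤ i := by
    intro i hi
    rw [hst1snd, List.mem_filter] at hi
    exact hposrng i hi.1
  apply List.ext_getElem?
  intro j
  by_cases hj : j < n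
  · rw [pvPass_fst_get? acumulada c1 "B" st1.2 hpos1 st1.1 [] j (by omega)]
    have hget : PySem.List.pyGetD acumulada (j : Int) 0 = acumulada[j] := by
      rw [PySem.List.pyGetD_natCast, List.getD_eq_getElem?_getD, List.getElem?_eq_getElem hj]; rfl
    have hmap : (acumulada.map (pvGrade c0 c1))[j]? = some (pvGrade c0 c1 acumulada[j]) := by
      rw [List.getElem?_map, List.getElem?_eq_getElem hj]; rfl
    rw [hmap]
    unfold pvGrade
    by_cases h0 : acumulada[j] ≤ c0
    · rw [if_neg, hst1get j hj, hget, if_pos h0, if_pos h0]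
      rintro ⟨hm, _⟩
      exact ((hmem1 j hj).mp hm) (hget ▸ h0)
    · by_cases h1 : acumulada[j] ≤ c1
      · rw [if_pos ⟨(hmem1 j hj).mpr (hget ▸ h0), hget ▸ h1⟩, if_neg h0, if_pos h1]
      · rw [if_neg (by rintro ⟨_, hle⟩; exact h1 (hget ▸ hle)), hst1get j hj, hget,
          if_neg h0, if_neg h0, if_neg h1]
  · have hl : ((st1.2.foldl (pvPassStep acumulada c1 "B") (st1.1, [])).1)[j]? = none := by
      apply List.getElem?_eq_none
      rw [pvPass_fst_length, hst1len]; omega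
    have hr : (acumulada.map (pvGrade c0 c1))[j]? = none := by
      apply List.getElem?_eq_none
      simp; omega
    rw [hl, hr]

-- ===== VERDICT (by name: the statement is the Claim_ definition above) =====
theorem calcularClassificacao_spec : Claim_equal_calcularClassificacao := by
  intro corte acumulada _ _
  show calcularClassificacao corte acumulada = calcularClassificacao_alt corte acumulada
  rw [pvA_eq_map, pvB_eq_map]
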